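-- pv_equiv track=rewrite | github.com/anjaliofficial/SmartFit | ml_service/app.py | detect_style_from_filename
-- ===== SOURCE A (Python) =====
-- def detect_style_from_filename(filename):
--     fname = filename.lower()
--     if any(tok in fname for tok in ["tshirt","tee","hoodie","sweatshirt","top"]):
--         return "Casual"
--     if any(tok in fname for tok in ["shirt","blouse","jacket","coat","blazer"]):
--         return "Formal"
--     if any(tok in fname for tok in ["dress","skirt"]):
--         return "Party/Festive"
--     return "Casual"
-- ===== SOURCE B (Python) =====
-- # B: single left-to-right scan of the filename; a dispatch table indexed by first
-- # character proposes candidate keywords at each position; matches set a per-style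
-- # flag (0=Casual, 1=Formal, 2=Party/Festive) and priority is resolved at the end.
-- FIRST = {
--     "t": [("tshirt", 0), ("tee", 0), ("top", 0)],
--     "h": [("hoodie", 0)],
--     "s": [("sweatshirt", 0), ("shirt", 1), ("skirt", 2)],
--     "b": [("blouse", 1), ("blazer", 1)],
--     "j": [("jacket", 1)],
--     "c": [("coat", 1)],
--     "d": [("dress", 2)],
-- }
--
-- def detect_style_from_filename(filename):
--     fname = filename.lower()
--     found = [False, False, False]
--     for i, ch in enumerate(fname):
--         for tok, g in FIRST.get(ch, []):
--             if fname.startswith(tok, i):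
--                 found[g] = True
--     if found[0]:
--         return "Casual"
--     if found[1]:
--         return "Formal"
--     if found[2]:
--         return "Party/Festive"
--     return "Casual"
-- ===== Notes on version B (the rewrite author's own statement) =====
-- stated objective: alternative
-- what changed: Replaces the three grouped substring-membership checks with a single positional scan of the filename driven by a first-character dispatch table that proposes candidate keywords at each position, accumulating one boolean flag per style and resolving the Casual>Formal>Party priority once at the end.
import Mathlib
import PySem

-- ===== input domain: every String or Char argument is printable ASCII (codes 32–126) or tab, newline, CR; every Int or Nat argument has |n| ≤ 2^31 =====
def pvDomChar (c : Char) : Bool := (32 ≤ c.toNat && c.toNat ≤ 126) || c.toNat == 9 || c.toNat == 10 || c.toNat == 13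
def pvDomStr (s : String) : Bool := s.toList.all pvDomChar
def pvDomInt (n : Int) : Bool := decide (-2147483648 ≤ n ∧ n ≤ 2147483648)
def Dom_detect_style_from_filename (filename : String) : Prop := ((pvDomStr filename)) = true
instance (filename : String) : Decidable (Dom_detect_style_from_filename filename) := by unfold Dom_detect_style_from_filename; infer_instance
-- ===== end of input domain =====

-- B replaces A's grouped substring-membership checks with one positional scan driven
-- by a first-character dispatch table accumulating per-style flags; objective: alternative.

-- ===== PORT A =====
def detect_style_from_filename (filename : String) : String :=
  let fname := PySem.Str.lower filename
  if ["tshirt","tee","hoodie","sweatshirt","top"].any (fun tok => PySem.Str.isIn tok fname) then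
    "Casual"
  else if ["shirt","blouse","jacket","coat","blazer"].any (fun tok => PySem.Str.isIn tok fname) then
    "Formal"
  else if ["dress","skirt"].any (fun tok => PySem.Str.isIn tok fname) then
    "Party/Festive"
  else
    "Casual"

-- ===== PORT B =====
def pvFirst : PySem.Dict Char (List (String × Int)) :=
  PySem.Dict.ofList
    [('t', [("tshirt", 0), ("tee", 0), ("top", 0)]),
     ('h', [("hoodie", 0)]),
     ('s', [("sweatshirt", 0), ("shirt", 1), ("skirt", 2)]),
     ('b', [("blouse", 1), ("blazer", 1)]),
     ('j', [("jacket", 1)]),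
     ('c', [("coat", 1)]),
     ('d', [("dress", 2)])]

-- one position of Source B's scan: `for tok, g in FIRST.get(ch, []): if fname.startswith(tok, i): found[g] = True`.
-- fname.startswith(tok, i) with 0 ≤ i ≤ len(fname) (i comes from enumerate) is exactly
-- 'tok.toList is a prefix of the code points from i on'; found[g] = True is List.set (g is 0/1/2).
def pvStep (cs : List Char) (fd : List Bool) (p : Int × Char) : List Bool :=
  (PySem.Dict.getD pvFirst p.2 []).foldl
    (fun fd tg =>
      if PySem.Chars.startswith (cs.drop p.1.toNat) tg.1.toList then fd.set tg.2.toNat true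
      else fd) fd

def detect_style_from_filename_alt (filename : String) : String :=
  let fname := PySem.Str.lower filename
  let found := (PySem.List.enumerate fname.toList 0).foldl (pvStep fname.toList) [false, false, false]
  if found.getD 0 false then "Casual"        -- found[0]: found always has length 3
  else if found.getD 1 false then "Formal"
  else if found.getD 2 false then "Party/Festive"
  else "Casual"

-- ===== PRECONDITION & SPEC =====
def Spec_detect_style_from_filename (filename : String) (out : String) : Prop := out = detect_style_from_filename_alt filename
instance (filename : String) (out : String) : Decidable (Spec_detect_style_from_filename filename out) := by unfold Spec_detect_style_from_filename; infer_instance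

-- ===== CLAIM (what is proved, stated in full; the proofs are below) =====
def Claim_equal_detect_style_from_filename : Prop := ∀ (filename : String), Dom_detect_style_from_filename filename → Spec_detect_style_from_filename filename (detect_style_from_filename filename)

-- ===== LEMMAS AND PROOFS =====

-- the dispatch table flattened: every (keyword, style-tag) pair
def pvTable : List (String × Int) :=
  [("tshirt", 0), ("tee", 0), ("top", 0), ("hoodie", 0), ("sweatshirt", 0),
   ("shirt", 1), ("skirt", 2), ("blouse", 1), ("blazer", 1), ("jacket", 1),
   ("coat", 1), ("dress", 2)]

-- did any keyword with tag g match starting at position p?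
def pvHit (cs : List Char) (g : Int) (p : Int × Char) : Bool :=
  (PySem.Dict.getD pvFirst p.2 []).any
    (fun tg => tg.2 == g && PySem.Chars.startswith (cs.drop p.1.toNat) tg.1.toList)

theorem pvFirst_items : PySem.Dict.items pvFirst =
    [('t', [("tshirt", 0), ("tee", 0), ("top", 0)]),
     ('h', [("hoodie", 0)]),
     ('s', [("sweatshirt", 0), ("shirt", 1), ("skirt", 2)]),
     ('b', [("blouse", 1), ("blazer", 1)]),
     ('j', [("jacket", 1)]),
     ('c', [("coat", 1)]),
     ('d', [("dress", 2)])] := by decide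

-- every candidate proposed by the dispatch table is a table entry
theorem pvMemTable {ch : Char} {tg : String × Int}
    (h : tg ∈ PySem.Dict.getD pvFirst ch []) : tg ∈ pvTable := by
  rw [PySem.Dict.getD_eq_get?_getD] at h
  cases hg : PySem.Dict.get? pvFirst ch with
  | none => rw [hg] at h; simp at h
  | some v =>
    rw [hg] at h
    simp only [Option.getD_some] at h
    have hmem : (ch, v) ∈ PySem.Dict.items pvFirst :=
      PySem.Dict.mem_items_of_get?_eq_some _ hg
    rw [pvFirst_items] at hmem
    simp only [List.mem_cons, List.not_mem_nil, or_false] at hmem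
    rcases hmem with h1 | h1 | h1 | h1 | h1 | h1 | h1 <;>
      (injection h1 with hch hv; subst hv; fin_cases h <;> decide)

theorem pvTableTags : ∀ tg ∈ pvTable, tg.2 = 0 ∨ tg.2 = 1 ∨ tg.2 = 2 := by decide

-- every table entry is proposed by the dispatch table at its first character
theorem pvTableFirst : ∀ tg ∈ pvTable,
    tg ∈ PySem.Dict.getD pvFirst (tg.1.toList.headD ' ') [] := by decide

theorem pvTableNe : ∀ tg ∈ pvTable, tg.1.toList ≠ [] := by decide

-- the inner fold over candidates sets exactly the flags of the matching tags
theorem pvFoldSet (sw : String → Bool) (l : List (String × Int))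
    (hl : ∀ tg ∈ l, tg.2 = 0 ∨ tg.2 = 1 ∨ tg.2 = 2) (a b c : Bool) :
    l.foldl (fun fd tg => if sw tg.1 then fd.set tg.2.toNat true else fd) [a, b, c]
      = [a || l.any (fun tg => tg.2 == 0 && sw tg.1),
         b || l.any (fun tg => tg.2 == 1 && sw tg.1),
         c || l.any (fun tg => tg.2 == 2 && sw tg.1)] := by
  induction l generalizing a b c with
  | nil => simp
  | cons x xs ih =>
    have hx := hl x (by simp)
    have hxs : ∀ tg ∈ xs, tg.2 = 0 ∨ tg.2 = 1 ∨ tg.2 = 2 := fun tg h => hl tg (by simp [h])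
    rw [List.foldl_cons]
    by_cases hsw : sw x.1
    · rcases hx with h0 | h1 | h2
      · rw [show (if sw x.1 = true then [a, b, c].set x.2.toNat true else [a, b, c]) = [true, b, c] by
            simp [hsw, h0], ih hxs]
        simp [List.any_cons, h0, hsw]
      · rw [show (if sw x.1 = true then [a, b, c].set x.2.toNat true else [a, b, c]) = [a, true, c] by
            simp [hsw, h1], ih hxs]
        simp [List.any_cons, h1, hsw]
      · rw [show (if sw x.1 = true then [a, b, c].set x.2.toNat true else [a, b, c]) = [a, b, true] by
            simp [hsw, h2], ih hxs]
        simp [List.any_cons, h2, hsw]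
    · rw [show (if sw x.1 = true then [a, b, c].set x.2.toNat true else [a, b, c]) = [a, b, c] by
          simp [hsw], ih hxs]
      simp [List.any_cons, hsw]

theorem pvStep_eq (cs : List Char) (a b c : Bool) (p : Int × Char) :
    pvStep cs [a, b, c] p
      = [a || pvHit cs 0 p, b || pvHit cs 1 p, c || pvHit cs 2 p] := by
  unfold pvStep pvHit
  exact pvFoldSet (fun t => PySem.Chars.startswith (cs.drop p.1.toNat) t.toList)
    (PySem.Dict.getD pvFirst p.2 []) (fun tg h => pvTableTags tg (pvMemTable h)) a b c

theorem pvFoldEnum (cs : List Char) (l : List (Int × Char)) (a b c : Bool) :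
    l.foldl (pvStep cs) [a, b, c]
      = [a || l.any (pvHit cs 0), b || l.any (pvHit cs 1), c || l.any (pvHit cs 2)] := by
  induction l generalizing a b c with
  | nil => simp
  | cons x xs ih => rw [List.foldl_cons, pvStep_eq, ih]; simp [Bool.or_assoc]

-- the positional scan finds a tag-g keyword iff some keyword of group G is a substring
theorem pvGroupAny (cs : List Char) (g : Int) (G : List String)
    (hGt : ∀ t ∈ G, (t, g) ∈ pvTable)
    (hTg : ∀ tg ∈ pvTable, tg.2 = g → tg.1 ∈ G) :
    (PySem.List.enumerate cs 0).any (pvHit cs g)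
      = G.any (fun t => PySem.Chars.isIn t.toList cs) := by
  apply Bool.eq_iff_iff.mpr
  simp only [List.any_eq_true, pvHit, Bool.and_eq_true, beq_iff_eq]
  constructor
  · rintro ⟨p, hp, tg, htg, hgg, hsw⟩
    rcases (PySem.List.mem_enumerate_iff _ _ _).mp hp with ⟨k, hk, rfl⟩
    refine ⟨tg.1, hTg tg (pvMemTable htg) hgg, ?_⟩
    rw [← PySem.Chars.exists_prefix_drop_iff_isIn]
    refine ⟨k, ?_⟩
    rw [PySem.Chars.startswith_iff] at hsw
    simpa using hsw
  · rintro ⟨t, htG, hin⟩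
    rw [← PySem.Chars.exists_prefix_drop_iff_isIn] at hin
    obtain ⟨j, hpre⟩ := hin
    have hne : t.toList ≠ [] := pvTableNe (t, g) (hGt t htG)
    obtain ⟨c0, rest, hct⟩ : ∃ c0 rest, t.toList = c0 :: rest := by
      cases hct : t.toList with
      | nil => exact absurd hct hne
      | cons x xs => exact ⟨x, xs, rfl⟩
    have hcopy := hpre
    obtain ⟨suf, hsuf⟩ := hcopy
    have hdrop : cs.drop j = c0 :: (rest ++ suf) := by
      rw [← hsuf, hct]; rfl
    have hjlt : j < cs.length := by
      by_contra hge
      push Not at hge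
      rw [List.drop_eq_nil_of_le hge] at hdrop
      simp at hdrop
    have hcsj : cs[j] = c0 := by
      have h1 : (cs.drop j).head? = some c0 := by rw [hdrop]; rfl
      rw [List.head?_drop] at h1
      rw [List.getElem?_eq_getElem hjlt] at h1
      exact Option.some_inj.mp h1
    refine ⟨((0 : Int) + (j : Nat), cs[j]), (PySem.List.mem_enumerate_iff _ _ _).mpr ⟨j, hjlt, rfl⟩,
      (t, g), ?_, rfl, ?_⟩
    · have hstep := pvTableFirst (t, g) (hGt t htG)
      have hh : (t, g).1.toList.headD ' ' = cs[j] := by simp [hct, hcsj]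
      rwa [hh] at hstep
    · rw [PySem.Chars.startswith_iff]
      simpa using hpre

-- ===== VERDICT (by name: the statement is the Claim_ definition above) =====
theorem detect_style_from_filename_spec : Claim_equal_detect_style_from_filename := by
  intro filename _
  simp only [Spec_detect_style_from_filename, detect_style_from_filename,
    detect_style_from_filename_alt]
  rw [pvFoldEnum]
  simp only [Bool.false_or, List.getD_cons_zero, List.getD_cons_succ]
  rw [pvGroupAny _ 0 ["tshirt","tee","hoodie","sweatshirt","top"] (by decide) (by decide),
      pvGroupAny _ 1 ["shirt","blouse","jacket","coat","blazer"] (by decide) (by decide),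
      pvGroupAny _ 2 ["dress","skirt"] (by decide) (by decide)]
  simp
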